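-- pv_equiv track=rewrite | github.com/frigodaw/pi-gps | python/pigps.py | findComma
-- ===== SOURCE A (Python) =====
-- def findComma(data, nr):
-- 	ret = -1
-- 	for i in range(len(data)):
-- 		if(data[i] == ","):
-- 			nr = nr-1
-- 			if(nr == 0):
-- 				ret = i
-- 			if((ret > 0) and (i == ret+1)): 	#empty slot!
-- 				ret = 0
-- 				return ret
-- 			if((ret > 0) and (i > ret+1)): 		#found before
-- 				return ret
-- 	return ret
-- ===== SOURCE B (Python) =====
-- def findComma(data, nr):
--     if nr <= 0:
--         return -1
--     p = -1
--     for _ in range(nr):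
--         p = data.find(',', p + 1)
--         if p == -1:
--             return -1
--     if p == 0:
--         return 0
--     if data[p + 1:p + 2] == ',':    # empty slot (slice is safe at end of string)
--         return 0
--     return p
-- ===== Notes on version B (the rewrite author's own statement) =====
-- stated objective: simpler
-- what changed: Replaces A's per-character state machine (ret/nr carried across iterations with positional comparisons i==ret+1) by a str.find jump loop locating the nr-th comma plus one direct slice look-ahead for the empty-slot case.
import Mathlib
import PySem

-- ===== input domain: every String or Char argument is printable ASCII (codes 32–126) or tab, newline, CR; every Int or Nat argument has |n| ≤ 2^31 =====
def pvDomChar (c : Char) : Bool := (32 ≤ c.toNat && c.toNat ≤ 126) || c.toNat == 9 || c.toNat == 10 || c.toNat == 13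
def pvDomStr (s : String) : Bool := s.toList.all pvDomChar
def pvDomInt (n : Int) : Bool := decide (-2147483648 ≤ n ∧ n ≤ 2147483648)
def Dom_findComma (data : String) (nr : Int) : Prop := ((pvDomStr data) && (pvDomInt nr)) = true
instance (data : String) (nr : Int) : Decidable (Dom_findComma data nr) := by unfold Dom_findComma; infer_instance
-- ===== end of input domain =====

-- B replaces A's per-character state machine by an nth-occurrence find loop plus one slice look-ahead (objective: simpler).


-- ===== PORT A =====
-- A's for-loop over indices: state (i, nr, ret), early returns kept in branch order.
def findCommaA_loop : List Char → Int → Int → Int → Int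
  | [], _, _, ret => ret
  | c :: rest, i, nr, ret =>
    if c = ',' then
      let nr' := nr - 1
      let ret' := if nr' = 0 then i else ret
      if ret' > 0 ∧ i = ret' + 1 then 0
      else if ret' > 0 ∧ i > ret' + 1 then ret'
      else findCommaA_loop rest (i + 1) nr' ret'
    else findCommaA_loop rest (i + 1) nr ret

def findComma (data : String) (nr : Int) : Int :=
  findCommaA_loop data.toList 0 nr (-1)

-- ===== PORT B =====
-- hand port of data.find(',', start): first index j ≥ start holding ','; exact for start ≥ 0 (all B's calls have start = p+1 ≥ 0).
def findFromAux : List Char → Int → Int → Int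
  | [], _, _ => -1
  | c :: rest, tgt, j => if tgt ≤ j ∧ c = ',' then j else findFromAux rest tgt (j + 1)

-- B's `for _ in range(nr)` loop; the in-loop `return -1` is the -1 short-circuit.
def findCommaB_loop (l : List Char) : Nat → Int → Int
  | 0, p => p
  | n + 1, p =>
    let q := findFromAux l (p + 1) 0
    if q = -1 then -1 else findCommaB_loop l n q

def findComma_alt (data : String) (nr : Int) : Int :=
  if nr ≤ 0 then -1
  else
    let p := findCommaB_loop data.toList nr.toNat (-1)
    if p = -1 then -1
    else if p = 0 then 0
    else if PySem.List.slice data.toList (some (p + 1)) (some (p + 2)) = [','] then 0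
    else p

-- ===== PRECONDITION & SPEC =====
def Spec_findComma (data : String) (nr : Int) (out : Int) : Prop := out = findComma_alt data nr
instance (data : String) (nr : Int) (out : Int) : Decidable (Spec_findComma data nr out) := by unfold Spec_findComma; infer_instance

-- ===== CLAIM (what is proved, stated in full; the proofs are below) =====
def Claim_equal_findComma : Prop := ∀ (data : String) (nr : Int), Dom_findComma data nr → Spec_findComma data nr (findComma data nr)

-- ===== LEMMAS AND PROOFS =====

-- Reference function: B's jump search viewed as a single structural scan of the suffix.
def bRef : List Char → Int → Nat → Int
  | [], _, _ => -1
  | c :: r, i, n =>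
    if c = ',' then
      if n = 1 then
        (if i = 0 then 0 else
          match r with
          | [] => i
          | d :: _ => if d = ',' then 0 else i)
      else bRef r (i + 1) (n - 1)
    else bRef r (i + 1) n

def firstComma : List Char → Int → Int
  | [], _ => -1
  | c :: r, j => if c = ',' then j else firstComma r (j + 1)

-- A's loop with nr exhausted and ret = -1 returns -1.
theorem lemA_neg : ∀ (l : List Char) (i nr : Int), nr ≤ 0 → findCommaA_loop l i nr (-1) = -1 := by
  intro l
  induction l with
  | nil => intro i nr _; rfl
  | cons c r ih =>
    intro i nr h
    by_cases hc : c = ','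
    · simp only [findCommaA_loop, hc, if_true]
      have h1 : ¬ (nr - 1 = 0) := by omega
      simp only [if_neg h1]
      have : ¬ ((-1 : Int) > 0 ∧ i = -1 + 1) := by omega
      simp only [if_neg this]
      have : ¬ ((-1 : Int) > 0 ∧ i > -1 + 1) := by omega
      simp only [if_neg this]
      exact ih (i + 1) (nr - 1) (by omega)
    · simp only [findCommaA_loop, if_neg hc]
      exact ih (i + 1) nr h

-- A's loop with ret = 0 (nth comma at index 0) returns 0.
theorem lemA_zero : ∀ (l : List Char) (i nr : Int), nr ≤ 0 → findCommaA_loop l i nr 0 = 0 := by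
  intro l
  induction l with
  | nil => intro i nr _; rfl
  | cons c r ih =>
    intro i nr h
    by_cases hc : c = ','
    · simp only [findCommaA_loop, hc, if_true]
      have h1 : ¬ (nr - 1 = 0) := by omega
      simp only [if_neg h1]
      have : ¬ ((0 : Int) > 0 ∧ i = 0 + 1) := by omega
      simp only [if_neg this]
      have : ¬ ((0 : Int) > 0 ∧ i > 0 + 1) := by omega
      simp only [if_neg this]
      exact ih (i + 1) (nr - 1) (by omega)
    · simp only [findCommaA_loop, if_neg hc]
      exact ih (i + 1) nr h

-- A's loop with ret = p > 0 found strictly before index i returns p.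
theorem lemA_found : ∀ (l : List Char) (i nr p : Int), nr ≤ 0 → 0 < p → p + 1 < i →
    findCommaA_loop l i nr p = p := by
  intro l
  induction l with
  | nil => intro i nr p _ _ _; rfl
  | cons c r ih =>
    intro i nr p h hp hi
    by_cases hc : c = ','
    · simp only [findCommaA_loop, hc, if_true]
      have h1 : ¬ (nr - 1 = 0) := by omega
      simp only [if_neg h1]
      have h2 : ¬ (p > 0 ∧ i = p + 1) := by omega
      simp only [if_neg h2]
      have h3 : p > 0 ∧ i > p + 1 := ⟨hp, by omega⟩
      simp only [if_pos h3]
    · simp only [findCommaA_loop, if_neg hc]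
      exact ih (i + 1) nr p h hp (by omega)

-- A's loop (searching phase, ret = -1) equals the reference scan.
theorem lemA_main : ∀ (l : List Char) (i nr : Int), 1 ≤ nr → 0 ≤ i →
    findCommaA_loop l i nr (-1) = bRef l i nr.toNat := by
  intro l
  induction l with
  | nil => intro i nr _ _; rfl
  | cons c r ih =>
    intro i nr hnr hi
    by_cases hc : c = ','
    · simp only [findCommaA_loop, bRef, hc, if_true]
      by_cases h1 : nr = 1
      · subst h1
        simp only [show (1 : Int) - 1 = 0 from rfl, if_true]
        have hA : ¬ (i > 0 ∧ i = i + 1) := by omega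
        simp only [if_neg hA]
        have hB : ¬ (i > 0 ∧ i > i + 1) := by omega
        simp only [if_neg hB]
        have hn1 : (1 : Int).toNat = 1 := rfl
        simp only [hn1, if_true]
        by_cases hz : i = 0
        · subst hz
          simp only [if_true]
          exact lemA_zero r 1 0 (by omega)
        · simp only [if_neg hz]
          cases r with
          | nil =>
            simp only [findCommaA_loop]
          | cons d r' =>
            by_cases hd : d = ','
            · simp only [findCommaA_loop, hd, if_true]
              have h1' : ¬ ((0 : Int) - 1 = 0) := by omega
              have h2' : i > 0 := by omega
              simp [h2']
            · simp only [findCommaA_loop, if_neg hd]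
              exact lemA_found r' (i + 1 + 1) 0 i (by omega) (by omega) (by omega)
      · have hnr2 : 2 ≤ nr := by omega
        have hne : ¬ (nr - 1 = 0) := by omega
        simp only [if_neg hne]
        have hA : ¬ ((-1 : Int) > 0 ∧ i = -1 + 1) := by omega
        simp only [if_neg hA]
        have hB : ¬ ((-1 : Int) > 0 ∧ i > -1 + 1) := by omega
        simp only [if_neg hB]
        have hnn : ¬ (nr.toNat = 1) := by omega
        simp only [if_neg hnn]
        have hsub : (nr - 1).toNat = nr.toNat - 1 := by omega
        rw [ih (i + 1) (nr - 1) (by omega) (by omega), hsub]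
    · simp only [findCommaA_loop, bRef, if_neg hc]
      exact ih (i + 1) nr hnr (by omega)

-- findFromAux once the target index has been reached scans for the first comma.
theorem lemF0 : ∀ (l : List Char) (tgt j : Int), tgt ≤ j → findFromAux l tgt j = firstComma l j := by
  intro l
  induction l with
  | nil => intro tgt j _; rfl
  | cons c r ih =>
    intro tgt j h
    by_cases hc : c = ','
    · simp only [findFromAux, firstComma, hc, and_true, if_pos h, if_true]
    · have : ¬ (tgt ≤ j ∧ c = ',') := by intro ⟨_, h2⟩; exact hc h2
      simp only [findFromAux, firstComma, if_neg this, if_neg hc]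
      exact ih tgt (j + 1) (by omega)

-- find(',', j+t) from position j equals the first comma of the suffix dropped by t.
theorem lemF : ∀ (l : List Char) (t : Nat) (j : Int),
    findFromAux l (j + (t : Int)) j = firstComma (l.drop t) (j + (t : Int)) := by
  intro l
  induction l with
  | nil => intro t j; simp [findFromAux, firstComma]
  | cons c r ih =>
    intro t j
    cases t with
    | zero =>
      simp only [Nat.cast_zero, add_zero, List.drop_zero]
      exact lemF0 (c :: r) j j (le_refl j)
    | succ t' =>
      have hlt : ¬ (j + ((t' + 1 : Nat) : Int) ≤ j) := by push_cast; omega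
      have : ¬ (j + ((t' + 1 : Nat) : Int) ≤ j ∧ c = ',') := by intro ⟨h1, _⟩; exact hlt h1
      simp only [findFromAux, if_neg this, List.drop_succ_cons]
      have harith : j + ((t' + 1 : Nat) : Int) = (j + 1) + (t' : Int) := by push_cast; ring
      rw [harith]
      exact ih t' (j + 1)
  
def postB (l : List Char) (p : Int) : Int :=
  if p = -1 then -1
  else if p = 0 then 0
  else if PySem.List.slice l (some (p + 1)) (some (p + 2)) = [','] then 0
  else p

-- find from index 0 with target p+1 (p ≥ -1) equals the first comma of the suffix.
theorem find_drop (l : List Char) (p : Int) (hp : -1 ≤ p) :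
    findFromAux l (p + 1) 0 = firstComma (l.drop (p + 1).toNat) (p + 1) := by
  have h0 : ((0 : Int) + ((p + 1).toNat : Int)) = p + 1 := by omega
  have := lemF l (p + 1).toNat 0
  rw [h0] at this
  exact this

-- one-element slice l[p+1:p+2] as take 1 of the dropped suffix (p+1 ≥ 0).
theorem slice_one (l : List Char) (p : Int) (hp : 0 ≤ p + 1) :
    PySem.List.slice l (some (p + 1)) (some (p + 2)) = (l.drop (p + 1).toNat).take 1 := by
  have h1 : p + 1 = (((p + 1).toNat : Nat) : Int) := by omega
  have h2 : p + 2 = (((p + 1).toNat + 1 : Nat) : Int) := by omega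
  rw [h1, h2, PySem.List.slice_natCast]
  congr 1
  omega

-- B's jump loop followed by the postprocessing equals the reference scan of the suffix.
theorem lemB_main : ∀ (s l : List Char) (p : Int) (n : Nat), 1 ≤ n → -1 ≤ p →
    s = l.drop (p + 1).toNat → postB l (findCommaB_loop l n p) = bRef s (p + 1) n := by
  intro s
  induction s with
  | nil =>
    intro l p n hn hp hs
    obtain ⟨m, rfl⟩ : ∃ m, n = m + 1 := ⟨n - 1, by omega⟩
    simp only [findCommaB_loop]
    rw [find_drop l p hp, ← hs]
    simp only [firstComma]
    rfl
  | cons c r ih =>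
    intro l p n hn hp hs
    have hdr : r = l.drop (p + 1 + 1).toNat := by
      have h2 : (p + 1 + 1).toNat = (p + 1).toNat + 1 := by omega
      rw [h2, ← List.drop_drop, ← hs]
      simp
    obtain ⟨m, rfl⟩ : ∃ m, n = m + 1 := ⟨n - 1, by omega⟩
    by_cases hc : c = ','
    · -- first comma of the suffix is at p+1
      have hq : findFromAux l (p + 1) 0 = p + 1 := by
        rw [find_drop l p hp, ← hs]
        simp [firstComma, hc]
      simp only [findCommaB_loop, hq]
      have hne : ¬ (p + 1 = -1) := by omega
      simp only [if_neg hne]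
      cases m with
      | zero =>
        -- loop returns p+1; postprocessing
        simp only [findCommaB_loop, postB, if_neg hne, bRef, hc, if_true]
        by_cases hz : p + 1 = 0
        · simp [hz]
        · simp only [if_neg hz]
          rw [slice_one l (p + 1) (by omega), ← hdr]
          cases r with
          | nil => simp
          | cons d r' =>
            by_cases hd : d = ','
            · simp [hd]
            · simp only [List.take_succ_cons, List.take_zero]
              have hne' : ¬ ([d] = [',']) := by simp [hd]
              simp [hne', hd]
      | succ m' =>
        have h1 : ¬ (m' + 1 + 1 = 1) := by omega
        simp only [bRef, hc, if_true, if_neg h1]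
        have hm : m' + 1 + 1 - 1 = m' + 1 := by omega
        rw [hm]
        have hih := ih l (p + 1) (m' + 1) (by omega) (by omega) hdr
        simp only [findCommaB_loop] at hih ⊢
        exact hih
    · -- skip a non-comma: the find target can advance by one
      have hq : findFromAux l (p + 1) 0 = findFromAux l (p + 1 + 1) 0 := by
        rw [find_drop l p hp, ← hs, find_drop l (p + 1) (by omega), ← hdr]
        simp only [firstComma, if_neg hc]
      have hbr : bRef (c :: r) (p + 1) (m + 1) = bRef r (p + 1 + 1) (m + 1) := by
        simp only [bRef, if_neg hc]
      rw [hbr]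
      have hih := ih l (p + 1) (m + 1) hn (by omega) hdr
      simp only [findCommaB_loop] at hih ⊢
      rw [hq]
      exact hih

-- ===== VERDICT (by name: the statement is the Claim_ definition above) =====
theorem findComma_spec : Claim_equal_findComma := by
  intro data nr _
  unfold Spec_findComma findComma findComma_alt
  by_cases h : nr ≤ 0
  · simp only [if_pos h]
    exact lemA_neg data.toList 0 nr h
  · simp only [if_neg h]
    rw [lemA_main data.toList 0 nr (by omega) (le_refl 0)]
    have := lemB_main data.toList data.toList (-1) nr.toNat (by omega) (by omega) (by simp)
    simp only [show (-1 : Int) + 1 = 0 from rfl] at this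
    rw [← this]
    rfl
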